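-- pv_equiv track=rewrite | github.com/MrMayow/tegan | new_idia/full.py | _nearest_pos_with_lsb
-- ===== SOURCE A (Python) =====
-- def _nearest_pos_with_lsb(target_bit: int, pos: int, n: int) -> int:
--     # Если НЗБ(pos) совпадает — оставляем, иначе ищем ближайший индекс
--     if (pos & 1) == target_bit:
--         return pos
--     # двунаправленный поиск с увеличением радиуса
--     radius = 1
--     best = None
--     while True:
--         down = pos - radius
--         up = pos + radius
--         cand = []
--         if down >= 0 and ((down & 1) == target_bit):
--             cand.append(down)
--         if up < n and ((up & 1) == target_bit):
--             cand.append(up)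
--         if cand:
--             # выбрать ближайший (по |delta|)
--             best = min(cand, key=lambda c: abs(c - pos))
--             return best
--         radius += 1
--         if down < 0 and up >= n:
--             # не найдено — возвращаем pos (не должно случаться при n>=2)
--             return pos
-- ===== SOURCE B (Python) =====
-- def _nearest_pos_with_lsb(target_bit: int, pos: int, n: int) -> int:
--     # Parity alternates between adjacent indices, so the nearest index with the
--     # requested LSB is at distance at most 1; prefer the lower neighbour on ties.
--     if (pos & 1) == target_bit:
--         return pos
--     if target_bit != 0 and target_bit != 1:
--         # no index has this LSB value; keep pos
--         return pos
--     if pos - 1 >= 0: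
--         return pos - 1
--     if pos + 1 < n:
--         return pos + 1
--     return pos
-- ===== Notes on version B (the rewrite author's own statement) =====
-- stated objective: faster
-- what changed: Replaces the radius-expanding bidirectional search loop with min() tie-break by a constant-time guard chain using the fact that LSB parity alternates between adjacent indices (lower neighbour preferred, matching A's tie-break).
import Mathlib
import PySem

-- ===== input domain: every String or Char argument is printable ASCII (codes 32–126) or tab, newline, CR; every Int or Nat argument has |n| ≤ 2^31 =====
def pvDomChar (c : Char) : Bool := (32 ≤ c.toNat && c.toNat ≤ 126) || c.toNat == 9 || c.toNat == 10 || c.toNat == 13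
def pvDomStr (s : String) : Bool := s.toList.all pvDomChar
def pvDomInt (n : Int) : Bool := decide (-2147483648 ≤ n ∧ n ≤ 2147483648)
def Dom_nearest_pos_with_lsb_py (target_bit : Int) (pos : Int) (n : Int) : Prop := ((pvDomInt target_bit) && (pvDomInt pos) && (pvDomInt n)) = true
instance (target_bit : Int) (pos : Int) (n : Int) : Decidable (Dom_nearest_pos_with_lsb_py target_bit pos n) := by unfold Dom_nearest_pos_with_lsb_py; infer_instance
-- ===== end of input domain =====

-- B replaces A's radius-expanding bidirectional search (with min() tie-break) by a
-- constant-time guard chain; parity alternates, so the answer is within distance 1.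

-- ===== PORT A =====
-- the 'while True' loop of A; radius is the current search radius
def nearestLoopA (target_bit : Int) (pos : Int) (n : Int) (radius : Int) : Int :=
  let cand : List Int :=
    (if pos - radius ≥ 0 ∧ PySem.Int.band (pos - radius) 1 = target_bit then [pos - radius] else []) ++
    (if pos + radius < n ∧ PySem.Int.band (pos + radius) 1 = target_bit then [pos + radius] else [])
  if cand = [] then
    -- radius += 1; if down < 0 and up >= n: return pos (checked with the pre-increment down/up)
    if h2 : pos - radius < 0 ∧ pos + radius ≥ n then pos
    else nearestLoopA target_bit pos n (radius + 1)
  else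
    -- best = min(cand, key=lambda c: abs(c - pos)); return best
    match PySem.List.min? cand (fun c => |c - pos|) with
    | some best => best
    | none => pos   -- unreachable: cand ≠ []
termination_by (max (pos + 1) (n - pos) - radius).toNat
decreasing_by omega

def nearest_pos_with_lsb_py (target_bit : Int) (pos : Int) (n : Int) : Int :=
  if PySem.Int.band pos 1 = target_bit then pos
  else nearestLoopA target_bit pos n 1

-- ===== PORT B =====
def nearest_pos_with_lsb_py_alt (target_bit : Int) (pos : Int) (n : Int) : Int :=
  if PySem.Int.band pos 1 = target_bit then pos
  else if target_bit ≠ 0 ∧ target_bit ≠ 1 then pos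
  else if pos - 1 ≥ 0 then pos - 1
  else if pos + 1 < n then pos + 1
  else pos

-- ===== PRECONDITION & SPEC =====
def Spec_nearest_pos_with_lsb_py (target_bit : Int) (pos : Int) (n : Int) (out : Int) : Prop := out = nearest_pos_with_lsb_py_alt target_bit pos n
instance (target_bit : Int) (pos : Int) (n : Int) (out : Int) : Decidable (Spec_nearest_pos_with_lsb_py target_bit pos n out) := by unfold Spec_nearest_pos_with_lsb_py; infer_instance

-- ===== CLAIM (what is proved, stated in full; the proofs are below) =====
def Claim_equal_nearest_pos_with_lsb_py : Prop := ∀ (target_bit : Int) (pos : Int) (n : Int), Dom_nearest_pos_with_lsb_py target_bit pos n → Spec_nearest_pos_with_lsb_py target_bit pos n (nearest_pos_with_lsb_py target_bit pos n)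

-- ===== LEMMAS AND PROOFS =====

-- x & 1 is x mod 2 (Python semantics on negatives as well)
theorem band_one (x : Int) : PySem.Int.band x 1 = x % 2 := by
  unfold PySem.Int.band
  norm_num
  split_ifs with h
  · rw [max_eq_left h]
  · obtain ⟨m, rfl⟩ : ∃ m : Nat, x = -((m : Int) + 1) := ⟨(-x - 1).toNat, by omega⟩
    have : (-(-((m : Int) + 1))).toNat = m + 1 := by omega
    rw [this]
    simp only [Nat.add_sub_cancel]
    rcases Nat.mod_two_eq_zero_or_one m with h2 | h2 <;> rw [h2] <;> omega

-- if target_bit is not a valid LSB value, no candidate ever matches and A's loop returns pos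
theorem nearestLoopA_invalid (target_bit pos n : Int)
    (h0 : target_bit ≠ 0) (h1 : target_bit ≠ 1) (radius : Int) :
    nearestLoopA target_bit pos n radius = pos := by
  have hdown : ∀ r : Int, PySem.Int.band (pos - r) 1 ≠ target_bit := by
    intro r; have := band_one (pos - r); omega
  have hup : ∀ r : Int, PySem.Int.band (pos + r) 1 ≠ target_bit := by
    intro r; have := band_one (pos + r); omega
  induction radius using nearestLoopA.induct target_bit pos n with
  | case1 r cand hc h2 => rw [nearestLoopA]; simp [hdown r, hup r, h2]
  | case2 r cand hc h2 ih => rw [nearestLoopA]; simp [hdown r, hup r]; exact fun _ => ih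
  | case3 r cand hc best hb => exact absurd (by simp [cand, hdown r, hup r]) hc
  | case4 r cand hc hb => exact absurd (by simp [cand, hdown r, hup r]) hc

-- valid target_bit that differs from pos & 1: both neighbours match, and A's first
-- loop iteration already decides (lower neighbour wins min's tie-break)
theorem nearestLoopA_first (target_bit pos n : Int)
    (hmatch : ¬ PySem.Int.band pos 1 = target_bit)
    (hval : ¬(target_bit ≠ 0 ∧ target_bit ≠ 1)) :
    nearestLoopA target_bit pos n 1 =
      (if pos - 1 ≥ 0 then pos - 1 else if pos + 1 < n then pos + 1 else pos) := by
  have hp := band_one pos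
  have hd : PySem.Int.band (pos - 1) 1 = target_bit := by rw [band_one]; omega
  have hu : PySem.Int.band (pos + 1) 1 = target_bit := by rw [band_one]; omega
  rw [nearestLoopA]
  by_cases hge : pos - 1 ≥ 0
  · have h1 : (1:Int) ≤ pos := by omega
    by_cases hlt : pos + 1 < n
    · simp [hd, hu, h1, hlt, PySem.List.min?]
    · simp [hd, hu, h1, hlt, PySem.List.min?]
  · have h1 : pos < 1 := by omega
    by_cases hlt : pos + 1 < n
    · simp [hd, hu, hlt, show ¬ (1:Int) ≤ pos by omega, PySem.List.min?]
    · simp [hd, hu, h1, hlt, show ¬ (1:Int) ≤ pos by omega, show n ≤ pos + 1 by omega]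

-- ===== VERDICT (by name: the statement is the Claim_ definition above) =====
theorem nearest_pos_with_lsb_py_spec : Claim_equal_nearest_pos_with_lsb_py := by
  intro target_bit pos n _
  unfold Spec_nearest_pos_with_lsb_py nearest_pos_with_lsb_py nearest_pos_with_lsb_py_alt
  by_cases hmatch : PySem.Int.band pos 1 = target_bit
  · simp [hmatch]
  · rw [if_neg hmatch, if_neg hmatch]
    by_cases hval : target_bit ≠ 0 ∧ target_bit ≠ 1
    · rw [if_pos hval]
      exact nearestLoopA_invalid target_bit pos n hval.1 hval.2 1
    · rw [if_neg hval]
      exact nearestLoopA_first target_bit pos n hmatch hval
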